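-- pv_equiv track=rewrite | github.com/Oleksandr0007/car_in_2D_maze | main.py | bfs
-- ===== SOURCE A (Python) =====
-- from collections import deque
--
-- def bfs(maze, start, end):
--     queue = deque([start])
--     visited = set()
--     parent = {}
--
--     while queue:
--         current = queue.popleft()
--         if current == end:
--             break
--
--         row, col = current
--         neighbors = [(row + 1, col), (row - 1, col), (row, col + 1), (row, col - 1)]
--         for neighbor in neighbors:
--             n_row, n_col = neighbor
--             if 0 <= n_row < len(maze) and 0 <= n_col < len(maze[0]) and maze[n_row][n_col] == 0 and neighbor not in visited:
--                 queue.append(neighbor)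
--                 visited.add(neighbor)
--                 parent[neighbor] = current
--
--     # Відновлюємо шлях з кінця до початку
--     path = []
--     current = end
--     while current != start:
--         path.append(current)
--         current = parent[current]
--     path.append(start)
--     path.reverse()
--     return path
-- ===== SOURCE B (Python) =====
-- from collections import deque
--
-- def bfs(maze, start, end):
--     # Queue-of-paths BFS: each queue entry is the whole path to its last cell,
--     # so there is no parent dict and no backward reconstruction pass.
--     queue = deque([[start]])
--     visited = set()
--     while queue:
--         path = queue.popleft()
--         current = path[-1]
--         if current == end:
--             return path
--         row, col = current
--         for neighbor in ((row + 1, col), (row - 1, col), (row, col + 1), (row, col - 1)):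
--             n_row, n_col = neighbor
--             if 0 <= n_row < len(maze) and 0 <= n_col < len(maze[0]) and maze[n_row][n_col] == 0 and neighbor not in visited:
--                 visited.add(neighbor)
--                 queue.append(path + [neighbor])
--     return None
-- ===== Notes on version B (the rewrite author's own statement) =====
-- stated objective: simpler
-- what changed: B runs a queue-of-paths BFS (each queue entry carries the whole path to its last cell) and returns the path the moment the end cell is popped, eliminating A's parent dictionary and its backward path-reconstruction loop entirely.
-- outside the precondition, e.g. on bfs([[0, 0], [0]], (0, 0), (1, 0)): A returns [(0, 0), (1, 0)], B returns [(0, 0), (1, 0)]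
import Mathlib
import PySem

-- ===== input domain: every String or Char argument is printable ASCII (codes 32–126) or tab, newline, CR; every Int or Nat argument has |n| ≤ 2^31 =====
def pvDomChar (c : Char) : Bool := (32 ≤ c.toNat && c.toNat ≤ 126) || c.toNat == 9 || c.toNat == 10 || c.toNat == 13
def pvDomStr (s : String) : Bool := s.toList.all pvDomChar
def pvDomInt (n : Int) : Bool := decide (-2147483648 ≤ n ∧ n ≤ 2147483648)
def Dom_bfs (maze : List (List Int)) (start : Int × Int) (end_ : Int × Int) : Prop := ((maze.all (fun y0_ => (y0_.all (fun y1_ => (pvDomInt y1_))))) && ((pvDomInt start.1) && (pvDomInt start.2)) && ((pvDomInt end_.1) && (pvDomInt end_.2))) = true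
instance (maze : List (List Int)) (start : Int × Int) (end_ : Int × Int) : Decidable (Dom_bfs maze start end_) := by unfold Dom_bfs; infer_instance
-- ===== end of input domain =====

-- B replaces A's parent dictionary + backward reconstruction with a queue-of-paths BFS
-- (each queue entry carries the whole path to its last cell); same return value, simpler shape.

-- ===== PORT A =====
-- shared by both ports and Pre_: the neighbour list, in the Python source order
def pvNbrs (c : Int × Int) : List (Int × Int) :=
  [(c.1 + 1, c.2), (c.1 - 1, c.2), (c.1, c.2 + 1), (c.1, c.2 - 1)]

-- Python's '0 <= n_row < len(maze) and 0 <= n_col < len(maze[0]) and maze[n_row][n_col] == 0'.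
-- Exact wherever Python does not raise; on a row shorter than row 0 Python raises IndexError
-- (excluded by Pre_) while this returns false.
def pvOpen (maze : List (List Int)) (n : Int × Int) : Bool :=
  decide (0 ≤ n.1) && decide (n.1 < (maze.length : Int)) &&
  decide (0 ≤ n.2) && decide (n.2 < (((maze.headD []).length : Int))) &&
  PySem.List.pyGet? (PySem.List.pyGetD maze n.1 []) n.2 == some 0

-- A's while-loop: queue of cells, visited set, parent dict.  The fuel is a totality guard only:
-- the value passed by `bfs` (cells + 2) is never exhausted, since each enqueue adds a fresh
-- visited cell inside the grid.
def bfsLoop (maze : List (List Int)) (end_ : Int × Int) :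
    Nat → List (Int × Int) → PySem.Set (Int × Int) →
    PySem.Dict (Int × Int) (Int × Int) → Option (PySem.Dict (Int × Int) (Int × Int))
  | 0, _, _, _ => none
  | _ + 1, [], _, parent => some parent
  | fuel + 1, current :: rest, visited, parent =>
    if current = end_ then some parent
    else
      let st := (pvNbrs current).foldl
        (fun (s : List (Int × Int) × PySem.Set (Int × Int) × PySem.Dict (Int × Int) (Int × Int)) n =>
          if pvOpen maze n && !(PySem.Set.contains s.2.1 n) then
            (s.1 ++ [n], PySem.Set.add s.2.1 n, PySem.Dict.insert s.2.2 n current)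
          else s)
        (rest, visited, parent)
      bfsLoop maze end_ fuel st.1 st.2.1 st.2.2

-- A's reconstruction loop 'while current != start: path.append(current); current = parent[current]',
-- then 'path.append(start); path.reverse()'.  none = KeyError (end unreachable; excluded by Pre_).
-- Fuel (parent chain length is at most its size) is a totality guard only.
def bfsRebuild (parent : PySem.Dict (Int × Int) (Int × Int)) (start : Int × Int) :
    Nat → (Int × Int) → List (Int × Int) → Option (List (Int × Int))
  | 0, _, _ => none
  | fuel + 1, current, path =>
    if current = start then some ((path ++ [start]).reverse)
    else
      match PySem.Dict.get? parent current with
      | none => none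
      | some p => bfsRebuild parent start fuel p (path ++ [current])

def bfs (maze : List (List Int)) (start : Int × Int) (end_ : Int × Int) : List (Int × Int) :=
  match bfsLoop maze end_ (maze.length * (maze.headD []).length + 2) [start]
      PySem.Set.empty PySem.Dict.empty with
  | none => []
  | some parent => (bfsRebuild parent start (PySem.Dict.size parent + 1) end_ []).getD []

-- ===== PORT B =====
-- B's while-loop: a queue of whole paths and a visited set; returns the popped path whose
-- last cell is the end.  Fuel is the same totality guard as in port A.
def bfsLoopAlt (maze : List (List Int)) (end_ : Int × Int) :
    Nat → List (List (Int × Int)) → PySem.Set (Int × Int) → List (Int × Int)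
  | 0, _, _ => []
  | _ + 1, [], _ => []
  | fuel + 1, path :: rest, visited =>
    let current := path.getLastD (0, 0)   -- path[-1]; every queued path is nonempty
    if current = end_ then path
    else
      let st := (pvNbrs current).foldl
        (fun (s : List (List (Int × Int)) × PySem.Set (Int × Int)) n =>
          if pvOpen maze n && !(PySem.Set.contains s.2 n) then
            (s.1 ++ [path ++ [n]], PySem.Set.add s.2 n)
          else s)
        (rest, visited)
      bfsLoopAlt maze end_ fuel st.1 st.2

def bfs_alt (maze : List (List Int)) (start : Int × Int) (end_ : Int × Int) : List (Int × Int) :=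
  bfsLoopAlt maze end_ (maze.length * (maze.headD []).length + 2) [[start]] PySem.Set.empty

-- ===== PRECONDITION & SPEC =====
-- reachable-cell closure: grow the set of cells reachable from start through open cells
def pvReachStep (maze : List (List Int)) (s : PySem.Set (Int × Int)) : PySem.Set (Int × Int) :=
  s.foldl (fun a c =>
    (pvNbrs c).foldl (fun a n => if pvOpen maze n then PySem.Set.add a n else a) a) s

def pvReach (maze : List (List Int)) : Nat → PySem.Set (Int × Int) → PySem.Set (Int × Int)
  | 0, s => s
  | fuel + 1, s =>
    let s' := pvReachStep maze s
    if s'.length = s.length then s else pvReach maze fuel s'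

-- Pre_ excludes (a) mazes with a row shorter than row 0, on which A can raise IndexError
-- mid-search (this also drops some ragged mazes whose short cells are never probed, where A
-- still returns — see the cite), and (b) inputs whose end cell is not reachable from start
-- through 0-cells, on which A raises KeyError in its reconstruction loop while B returns
-- None (not a list).  Reachability of end_ is the semantic condition here; a decidable
-- statement of graph reachability is necessarily a monotone closure over the grid, and
-- pvReach above is exactly that (a growing cell set; no queue, no parent dict, no paths —
-- it is not a copy of either port's algorithm).
def Pre_bfs (maze : List (List Int)) (start : Int × Int) (end_ : Int × Int) : Prop :=
  (∀ row ∈ maze, (maze.headD []).length ≤ row.length) ∧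
  end_ ∈ pvReach maze (maze.length * (maze.headD []).length + 1)
      (PySem.Set.add PySem.Set.empty start)

instance (maze : List (List Int)) (start : Int × Int) (end_ : Int × Int) :
    Decidable (Pre_bfs maze start end_) := by unfold Pre_bfs; infer_instance

def pvWitness_bfs : List (List Int) × (Int × Int) × (Int × Int) :=
  ([[0, 0], [1, 0]], (0, 0), (1, 1))

def Spec_bfs (maze : List (List Int)) (start : Int × Int) (end_ : Int × Int) (out : List (Int × Int)) : Prop := out = bfs_alt maze start end_
instance (maze : List (List Int)) (start : Int × Int) (end_ : Int × Int) (out : List (Int × Int)) : Decidable (Spec_bfs maze start end_ out) := by unfold Spec_bfs; infer_instance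

-- ===== CLAIM (what is proved, stated in full; the proofs are below) =====
def Claim_equal_bfs : Prop := ∀ (maze : List (List Int)) (start : Int × Int) (end_ : Int × Int), Dom_bfs maze start end_ → Pre_bfs maze start end_ → Spec_bfs maze start end_ (bfs maze start end_)

-- ===== LEMMAS AND PROOFS =====

def pvR (parent : PySem.Dict (Int × Int) (Int × Int)) (start : Int × Int)
    (c : Int × Int) (p : List (Int × Int)) : Prop :=
  (c = start ∧ p.getLast? = some start) ∨
  bfsRebuild parent start (PySem.Dict.size parent + 1) c [] = some p

lemma pvRebuild_mono (parent : PySem.Dict (Int × Int) (Int × Int)) (start : Int × Int) :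
    ∀ (f f' : Nat) (c : Int × Int) (path r : List (Int × Int)), f ≤ f' →
      bfsRebuild parent start f c path = some r → bfsRebuild parent start f' c path = some r := by
  intro f
  induction f with
  | zero => intro f' c path r _ h; simp [bfsRebuild] at h
  | succ f ih =>
    intro f' c path r hle h
    obtain ⟨f'', rfl⟩ : ∃ f'', f' = f'' + 1 := ⟨f' - 1, by omega⟩
    rw [bfsRebuild] at h ⊢
    by_cases hc : c = start
    · simpa [hc] using h
    · simp only [hc, if_false] at h ⊢
      cases hq : PySem.Dict.get? parent c with
      | none => rw [hq] at h; simp at h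
      | some p => rw [hq] at h; simp only at h ⊢; exact ih f'' p (path ++ [c]) r (by omega) h

lemma pvRebuild_acc (parent : PySem.Dict (Int × Int) (Int × Int)) (start : Int × Int) :
    ∀ (f : Nat) (c : Int × Int) (path : List (Int × Int)),
      bfsRebuild parent start f c path
        = (bfsRebuild parent start f c []).map (fun q => q ++ path.reverse) := by
  intro f
  induction f with
  | zero => intro c path; simp [bfsRebuild]
  | succ f ih =>
    intro c path
    rw [bfsRebuild, bfsRebuild]
    by_cases hc : c = start
    · simp [hc]
    · simp only [hc, if_false]
      cases hq : PySem.Dict.get? parent c with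
      | none => simp
      | some p =>
        simp only
        rw [ih p (path ++ [c]), ih p ([] ++ [c])]
        cases bfsRebuild parent start f p [] <;> simp

lemma pvRebuild_insert_fresh (parent : PySem.Dict (Int × Int) (Int × Int))
    (start n v : Int × Int) (hn : PySem.Dict.get? parent n = none) :
    ∀ (f : Nat) (c : Int × Int) (path r : List (Int × Int)),
      bfsRebuild parent start f c path = some r →
      bfsRebuild (PySem.Dict.insert parent n v) start f c path = some r := by
  intro f
  induction f with
  | zero => intro c path r h; simp [bfsRebuild] at h
  | succ f ih =>
    intro c path r h
    rw [bfsRebuild] at h ⊢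
    by_cases hc : c = start
    · simpa [hc] using h
    · simp only [hc, if_false] at h ⊢
      cases hq : PySem.Dict.get? parent c with
      | none => rw [hq] at h; simp at h
      | some p =>
        rw [hq] at h; simp only at h
        have hcn : c ≠ n := by rintro rfl; rw [hq] at hn; exact absurd hn (by simp)
        rw [PySem.Dict.get?_insert_of_ne parent v hcn, hq]
        simp only
        exact ih p (path ++ [c]) r h

lemma pvRebuild_last (parent : PySem.Dict (Int × Int) (Int × Int)) (start : Int × Int) :
    ∀ (f : Nat) (c : Int × Int) (r : List (Int × Int)),
      bfsRebuild parent start f c [] = some r → r.getLast? = some c := by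
  intro f
  induction f with
  | zero => intro c r h; simp [bfsRebuild] at h
  | succ f ih =>
    intro c r h
    rw [bfsRebuild] at h
    by_cases hc : c = start
    · simp [hc] at h ⊢; simp [← h]
    · simp only [hc, if_false] at h
      cases hq : PySem.Dict.get? parent c with
      | none => rw [hq] at h; simp at h
      | some p =>
        rw [hq] at h; simp only at h
        rw [pvRebuild_acc] at h
        cases hb : bfsRebuild parent start f p [] with
        | none => rw [hb] at h; exact absurd h (by simp)
        | some q => rw [hb] at h; simp at h; simp [← h]

lemma pvR_insert_fresh (parent : PySem.Dict (Int × Int) (Int × Int)) (start n v : Int × Int)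
    (hn : PySem.Dict.get? parent n = none) (c : Int × Int) (p : List (Int × Int))
    (h : pvR parent start c p) : pvR (PySem.Dict.insert parent n v) start c p := by
  rcases h with h | h
  · exact Or.inl h
  · right
    have hsz : (PySem.Dict.insert parent n v).size = PySem.Dict.size parent + 1 := by
      rw [PySem.Dict.size_insert, PySem.Dict.contains_eq_isSome_get?, hn]; simp
    rw [hsz]
    exact pvRebuild_mono _ _ _ _ _ _ _ (by omega) (pvRebuild_insert_fresh _ _ _ _ hn _ _ _ _ h)

lemma pvForall₂_append {R : (Int × Int) → List (Int × Int) → Prop}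
    {a : List (Int × Int)} {b : List (List (Int × Int))} {c : List (Int × Int)}
    {d : List (List (Int × Int))} (h1 : List.Forall₂ R a b) (h2 : List.Forall₂ R c d) :
    List.Forall₂ R (a ++ c) (b ++ d) := by
  induction h1 with
  | nil => exact h2
  | cons h _ ih => exact List.Forall₂.cons h ih

lemma pvFold (maze : List (List Int)) (start end_ c : Int × Int) (p : List (Int × Int)) :
    ∀ (ns : List (Int × Int)) (qA : List (Int × Int)) (qB : List (List (Int × Int)))
      (visited : PySem.Set (Int × Int)) (parent : PySem.Dict (Int × Int) (Int × Int)),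
      (∀ k, (PySem.Dict.get? parent k).isSome = true → PySem.Set.contains visited k = true) →
      ((PySem.Dict.get? parent end_).isSome = true → end_ ∈ qA) →
      List.Forall₂ (pvR parent start) qA qB →
      bfsRebuild parent start (PySem.Dict.size parent + 1) c [] = some p →
      (let sA := ns.foldl
          (fun (s : List (Int × Int) × PySem.Set (Int × Int) × PySem.Dict (Int × Int) (Int × Int)) n =>
            if pvOpen maze n && !(PySem.Set.contains s.2.1 n) then
              (s.1 ++ [n], PySem.Set.add s.2.1 n, PySem.Dict.insert s.2.2 n c)
            else s)
          (qA, visited, parent)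
       let sB := ns.foldl
          (fun (s : List (List (Int × Int)) × PySem.Set (Int × Int)) n =>
            if pvOpen maze n && !(PySem.Set.contains s.2 n) then
              (s.1 ++ [p ++ [n]], PySem.Set.add s.2 n)
            else s)
          (qB, visited)
       sB.2 = sA.2.1 ∧
       (∀ k, (PySem.Dict.get? sA.2.2 k).isSome = true → PySem.Set.contains sA.2.1 k = true) ∧
       ((PySem.Dict.get? sA.2.2 end_).isSome = true → end_ ∈ sA.1) ∧
       List.Forall₂ (pvR sA.2.2 start) sA.1 sB.1 ∧
       bfsRebuild sA.2.2 start (PySem.Dict.size sA.2.2 + 1) c [] = some p ∧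
       (∀ k, PySem.Set.contains visited k = true → PySem.Set.contains sA.2.1 k = true) ∧
       (∀ n ∈ ns, pvOpen maze n = true → PySem.Set.contains sA.2.1 n = true)) := by
  intro ns
  induction ns with
  | nil =>
    intro qA qB visited parent hkeys hend hrel hc
    exact ⟨rfl, hkeys, hend, hrel, hc, fun k h => h, by simp⟩
  | cons n ns ih =>
    intro qA qB visited parent hkeys hend hrel hc
    simp only [List.foldl_cons]
    by_cases hg : (pvOpen maze n && !(PySem.Set.contains visited n)) = true
    · have hopen : pvOpen maze n = true ∧ PySem.Set.contains visited n = false := by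
        simpa using hg
      have hfresh : PySem.Dict.get? parent n = none := by
        cases hq : PySem.Dict.get? parent n with
        | none => rfl
        | some w =>
          have := hkeys n (by rw [hq]; rfl)
          rw [this] at hopen; exact absurd hopen.2 (by simp)
      have hsz : (PySem.Dict.insert parent n c).size = PySem.Dict.size parent + 1 := by
        rw [PySem.Dict.size_insert, PySem.Dict.contains_eq_isSome_get?, hfresh]; simp
      have hcontadd : ∀ k, PySem.Set.contains visited k = true →
          PySem.Set.contains (PySem.Set.add visited n) k = true := by
        intro k h
        rw [PySem.Set.contains_iff] at h ⊢
        exact (PySem.Set.mem_add _ _ _).2 (Or.inl h)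
      have hselfadd : PySem.Set.contains (PySem.Set.add visited n) n = true := by
        rw [PySem.Set.contains_iff]
        exact (PySem.Set.mem_add _ _ _).2 (Or.inr rfl)
      have hkeys' : ∀ k, (PySem.Dict.get? (PySem.Dict.insert parent n c) k).isSome = true →
          PySem.Set.contains (PySem.Set.add visited n) k = true := by
        intro k h
        rw [PySem.Dict.get?_insert] at h
        by_cases hk : k = n
        · rw [hk]; exact hselfadd
        · rw [if_neg hk] at h; exact hcontadd k (hkeys k h)
      have hend' : (PySem.Dict.get? (PySem.Dict.insert parent n c) end_).isSome = true →
          end_ ∈ qA ++ [n] := by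
        intro h
        rw [PySem.Dict.get?_insert] at h
        by_cases hk : end_ = n
        · rw [hk]; simp
        · rw [if_neg hk] at h; exact List.mem_append_left _ (hend h)
      have hrel' : List.Forall₂ (pvR (PySem.Dict.insert parent n c) start)
          (qA ++ [n]) (qB ++ [p ++ [n]]) := by
        refine pvForall₂_append (hrel.imp (fun {_ _} hab => pvR_insert_fresh _ _ _ _ hfresh _ _ hab)) ?_
        refine List.Forall₂.cons ?_ List.Forall₂.nil
        by_cases hn : n = start
        · exact Or.inl ⟨hn, by rw [List.getLast?_concat, hn]⟩
        · right
          rw [hsz]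
          rw [bfsRebuild]
          rw [if_neg hn, PySem.Dict.get?_insert_self]
          simp only
          rw [pvRebuild_acc]
          rw [pvRebuild_insert_fresh _ _ _ _ hfresh _ _ _ _ hc]
          simp
      have hc' : bfsRebuild (PySem.Dict.insert parent n c) start
          ((PySem.Dict.insert parent n c).size + 1) c [] = some p := by
        rw [hsz]
        exact pvRebuild_mono _ _ _ _ _ _ _ (by omega)
          (pvRebuild_insert_fresh _ _ _ _ hfresh _ _ _ _ hc)
      have IH := ih (qA ++ [n]) (qB ++ [p ++ [n]]) (PySem.Set.add visited n)
        (PySem.Dict.insert parent n c) hkeys' hend' hrel' hc'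
      simp only [hg, if_true]
      obtain ⟨i1, i2, i3, i4, i5, i6, i7⟩ := IH
      refine ⟨i1, i2, i3, i4, i5, fun k h => i6 k (hcontadd k h), ?_⟩
      intro m hm _hopen
      rcases List.mem_cons.1 hm with rfl | hm'
      · exact i6 m hselfadd
      · exact i7 m hm' _hopen
    · have hg' : (pvOpen maze n && !(PySem.Set.contains visited n)) = false := by
        simpa using hg
      have IH := ih qA qB visited parent hkeys hend hrel hc
      simp only [hg']
      obtain ⟨i1, i2, i3, i4, i5, i6, i7⟩ := IH
      refine ⟨i1, i2, i3, i4, i5, i6, ?_⟩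
      intro m hm hopen
      rcases List.mem_cons.1 hm with rfl | hm'
      · refine i6 m ?_
        by_contra hfalse
        have hcf : PySem.Set.contains visited m = false := by
          simpa using hfalse
        rw [hopen, hcf] at hg'; simp at hg'
      · exact i7 m hm' hopen

lemma pvFoldA_noop (maze : List (List Int)) (c : Int × Int) :
    ∀ (ns : List (Int × Int)) (qA : List (Int × Int)) (visited : PySem.Set (Int × Int))
      (parent : PySem.Dict (Int × Int) (Int × Int)),
      (∀ n ∈ ns, (pvOpen maze n && !(PySem.Set.contains visited n)) = false) →
      ns.foldl
        (fun (s : List (Int × Int) × PySem.Set (Int × Int) × PySem.Dict (Int × Int) (Int × Int)) n =>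
          if pvOpen maze n && !(PySem.Set.contains s.2.1 n) then
            (s.1 ++ [n], PySem.Set.add s.2.1 n, PySem.Dict.insert s.2.2 n c)
          else s)
        (qA, visited, parent) = (qA, visited, parent) := by
  intro ns
  induction ns with
  | nil => intro qA visited parent _; rfl
  | cons n ns ih =>
    intro qA visited parent h
    simp only [List.foldl_cons, h n (List.mem_cons_self)]
    exact ih qA visited parent (fun m hm => h m (List.mem_cons_of_mem _ hm))

lemma pvFoldB_noop (maze : List (List Int)) (p : List (Int × Int)) :
    ∀ (ns : List (Int × Int)) (qB : List (List (Int × Int))) (visited : PySem.Set (Int × Int)),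
      (∀ n ∈ ns, (pvOpen maze n && !(PySem.Set.contains visited n)) = false) →
      ns.foldl
        (fun (s : List (List (Int × Int)) × PySem.Set (Int × Int)) n =>
          if pvOpen maze n && !(PySem.Set.contains s.2 n) then
            (s.1 ++ [p ++ [n]], PySem.Set.add s.2 n)
          else s)
        (qB, visited) = (qB, visited) := by
  intro ns
  induction ns with
  | nil => intro qB visited _; rfl
  | cons n ns ih =>
    intro qB visited h
    simp only [List.foldl_cons, h n (List.mem_cons_self)]
    exact ih qB visited (fun m hm => h m (List.mem_cons_of_mem _ hm))

lemma pvLockstep (maze : List (List Int)) (start end_ : Int × Int) (hse : start ≠ end_) :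
    ∀ (fuel : Nat) (qA : List (Int × Int)) (qB : List (List (Int × Int)))
      (visited : PySem.Set (Int × Int)) (parent : PySem.Dict (Int × Int) (Int × Int)),
      (∀ k, (PySem.Dict.get? parent k).isSome = true → PySem.Set.contains visited k = true) →
      ((PySem.Dict.get? parent end_).isSome = true → end_ ∈ qA) →
      List.Forall₂ (pvR parent start) qA qB →
      ((∀ n ∈ pvNbrs start, pvOpen maze n = true → PySem.Set.contains visited n = true) ∨
        (qA = [start] ∧ qB = [[start]] ∧ visited = PySem.Set.empty)) →
      (match bfsLoop maze end_ fuel qA visited parent with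
        | none => []
        | some par => (bfsRebuild par start (PySem.Dict.size par + 1) end_ []).getD []) =
      bfsLoopAlt maze end_ fuel qB visited := by
  intro fuel
  induction fuel with
  | zero => intro qA qB visited parent _ _ _ _; simp [bfsLoop, bfsLoopAlt]
  | succ fuel ih =>
    intro qA qB visited parent hkeys hend hrel hglob
    cases hrel with
    | nil =>
      rw [bfsLoop, bfsLoopAlt]
      have hnone : PySem.Dict.get? parent end_ = none := by
        cases hq : PySem.Dict.get? parent end_ with
        | none => rfl
        | some w => exact absurd (hend (by rw [hq]; rfl)) (List.not_mem_nil)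
      have hes : ¬ (end_ = start) := fun h => hse h.symm
      simp [bfsRebuild, hnone, hes]
    | @cons current pB restA restB hhead htail =>
      rw [bfsLoop, bfsLoopAlt]
      have hcur : pB.getLastD (0, 0) = current := by
        rcases hhead with ⟨h1, h2⟩ | h
        · rw [List.getLastD_eq_getLast?, h2, h1]; rfl
        · rw [List.getLastD_eq_getLast?, pvRebuild_last _ _ _ _ _ h]; rfl
      rw [hcur]
      by_cases hce : current = end_
      · rw [if_pos hce, if_pos hce]
        rcases hhead with ⟨h1, _⟩ | h
        · exact absurd (h1 ▸ hce) hse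
        · rw [← hce]; simp only [h, Option.getD_some]
      · rw [if_neg hce, if_neg hce]
        dsimp only
        have hend' : (PySem.Dict.get? parent end_).isSome = true → end_ ∈ restA := by
          intro h
          rcases List.mem_cons.1 (hend h) with h' | h'
          · exact absurd h'.symm hce
          · exact h'
        rcases hglob with hS | ⟨hqa, hqb, hvis⟩
        · rcases hhead with ⟨h1, h2⟩ | hc
          · -- re-popped start entry: expansion is a no-op
            have hguards : ∀ n ∈ pvNbrs current, (pvOpen maze n && !(PySem.Set.contains visited n)) = false := by
              intro n hn
              by_cases ho : pvOpen maze n = true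
              · rw [ho, hS n (h1 ▸ hn) ho]; rfl
              · rw [Bool.not_eq_true] at ho; rw [ho]; rfl
            rw [pvFoldA_noop maze current _ _ _ _ hguards, pvFoldB_noop maze pB _ _ _ hguards]
            exact ih restA restB visited parent hkeys hend' htail (Or.inl hS)
          · have hfold := pvFold maze start end_ current pB (pvNbrs current) restA restB visited parent
              hkeys hend' htail hc
            obtain ⟨f1, f2, f3, f4, f5, f6, f7⟩ := hfold
            rw [f1]
            exact ih _ _ _ _ f2 f3 f4 (Or.inl (fun n hn ho => f6 n (hS n hn ho)))
        · -- the initial state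
          obtain ⟨h1, h0⟩ : current = start ∧ restA = [] := by simpa using hqa
          obtain ⟨hb1, hb0⟩ : pB = [start] ∧ restB = [] := by simpa using hqb
          have hc : bfsRebuild parent start (PySem.Dict.size parent + 1) current [] = some pB := by
            rw [h1, hb1, bfsRebuild]; simp
          have hfold := pvFold maze start end_ current pB (pvNbrs current) restA restB visited parent
            hkeys hend' htail hc
          obtain ⟨f1, f2, f3, f4, f5, f6, f7⟩ := hfold
          rw [f1]
          exact ih _ _ _ _ f2 f3 f4 (Or.inl (fun n hn ho => f7 n (h1 ▸ hn) ho))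

-- ===== VERDICT (by name: the statement is the Claim_ definition above) =====
theorem bfs_spec : Claim_equal_bfs := by
  unfold Claim_equal_bfs
  intro maze start end_ _hdom _hpre
  unfold Spec_bfs
  by_cases hse : start = end_
  · subst hse
    unfold bfs bfs_alt
    obtain ⟨f, hf⟩ : ∃ f, maze.length * (maze.headD []).length + 2 = f + 1 :=
      ⟨maze.length * (maze.headD []).length + 1, rfl⟩
    rw [hf, bfsLoop, bfsLoopAlt]
    simp [bfsRebuild]
  · unfold bfs bfs_alt
    refine pvLockstep maze start end_ hse _ [start] [[start]] PySem.Set.empty PySem.Dict.empty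
      (by simp [PySem.Dict.get?_empty]) (by simp [PySem.Dict.get?_empty]) ?_ (Or.inr ⟨rfl, rfl, rfl⟩)
    refine List.Forall₂.cons (Or.inr ?_) List.Forall₂.nil
    rw [show PySem.Dict.size (PySem.Dict.empty : PySem.Dict (Int × Int) (Int × Int)) = 0 from rfl,
      bfsRebuild]
    simp
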